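-- pv_equiv track=rewrite | github.com/MatiPl01/Wstep-do-Informatyki | Ćwiczenia/4. Zajęcia/Zadanie5/Program1.py | greatest_column_to_row_sum_ratio_element
-- ===== SOURCE A (Python) =====
-- def greatest_column_to_row_sum_ratio_element(matrix: list) -> tuple:
--     """Returns a tuple containing row and column index of a number for which
--     a sum of elements being in the same column divided by a sum of elements from
--     the same row as the checked number is the greatest"""
--     max_col_sum_idx = 0
--     greatest_col_sum = 0
--     for col_idx in range(len(matrix[0])):
--         curr_sum = 0
--         for row_idx in range(len(matrix)):
--             curr_sum += matrix[row_idx][col_idx]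
--         if curr_sum > greatest_col_sum:
--             greatest_col_sum = curr_sum
--             max_col_sum_idx = col_idx
--
--     min_row_sum_idx = 0
--     lowest_row_sum = sum(matrix[0])
--     for row_idx in range(1, len(matrix)):
--         curr_sum = 0
--         for col_idx in range(len(matrix[0])):
--             curr_sum += matrix[row_idx][col_idx]
--         if curr_sum and curr_sum < lowest_row_sum:
--             lowest_row_sum = curr_sum
--             min_row_sum_idx = row_idx
--
--     return min_row_sum_idx, max_col_sum_idx
-- ===== SOURCE B (Python) =====
-- def greatest_column_to_row_sum_ratio_element(matrix: list) -> tuple: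
--     """Single row-major pass builds per-column and per-row sum tables,
--     then two independent 1-D scans pick the answer indices."""
--     m = len(matrix[0])
--     col_sums = [0] * m
--     row_sums = []
--     for row in matrix:
--         t = row[:m]
--         col_sums = [c + x for c, x in zip(col_sums, t)]
--         row_sums.append(sum(t))
--
--     max_col_sum_idx = 0
--     greatest = 0
--     for j, s in enumerate(col_sums):
--         if s > greatest:
--             greatest = s
--             max_col_sum_idx = j
--
--     min_row_sum_idx = 0
--     lowest = row_sums[0]
--     for i, s in enumerate(row_sums[1:], 1):
--         if s and s < lowest:
--             lowest = s
--             min_row_sum_idx = i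
--
--     return min_row_sum_idx, max_col_sum_idx
-- ===== Notes on version B (the rewrite author's own statement) =====
-- stated objective: alternative
-- what changed: A recomputes each column sum with a nested column-major loop and each row sum with a second nested loop; B makes one row-major pass building col_sums and row_sums tables, then two flat 1-D scans over the tables pick the indices.
import Mathlib
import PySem

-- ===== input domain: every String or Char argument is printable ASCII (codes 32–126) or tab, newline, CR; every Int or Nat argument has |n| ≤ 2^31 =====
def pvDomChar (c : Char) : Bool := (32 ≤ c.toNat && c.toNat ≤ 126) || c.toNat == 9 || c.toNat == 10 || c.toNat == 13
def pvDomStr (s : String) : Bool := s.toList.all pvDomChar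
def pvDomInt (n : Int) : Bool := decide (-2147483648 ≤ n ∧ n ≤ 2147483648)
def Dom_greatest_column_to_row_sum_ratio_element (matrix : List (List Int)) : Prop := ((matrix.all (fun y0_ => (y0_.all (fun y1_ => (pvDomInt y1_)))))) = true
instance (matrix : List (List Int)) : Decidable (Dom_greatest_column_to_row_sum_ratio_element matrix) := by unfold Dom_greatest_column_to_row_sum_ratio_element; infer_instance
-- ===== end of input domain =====

-- B replaces A's two nested column-major/row-major sum loops by one row-major pass building
-- col_sums/row_sums tables followed by two flat 1-D scans (alternative decomposition, same cost).

-- ===== PORT A =====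
def greatest_column_to_row_sum_ratio_element (matrix : List (List Int)) : Int × Int :=
  let m : Nat := (PySem.List.pyGetD matrix 0 []).length
  let n : Nat := matrix.length
  let colSt := (PySem.List.pyRange 0 (m : Int)).foldl (fun (st : Int × Int) colIdx =>
      let curr := (PySem.List.pyRange 0 (n : Int)).foldl
        (fun c rowIdx => c + PySem.List.pyGetD (PySem.List.pyGetD matrix rowIdx []) colIdx 0) 0
      if curr > st.2 then (colIdx, curr) else st) (0, 0)
  let rowSt := (PySem.List.pyRange 1 (n : Int)).foldl (fun (st : Int × Int) rowIdx =>
      let curr := (PySem.List.pyRange 0 (m : Int)).foldl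
        (fun c colIdx => c + PySem.List.pyGetD (PySem.List.pyGetD matrix rowIdx []) colIdx 0) 0
      if curr ≠ 0 ∧ curr < st.2 then (rowIdx, curr) else st) (0, (PySem.List.pyGetD matrix 0 []).sum)
  (rowSt.1, colSt.1)

-- ===== PORT B =====
def greatest_column_to_row_sum_ratio_element_alt (matrix : List (List Int)) : Int × Int :=
  let m : Nat := (PySem.List.pyGetD matrix 0 []).length
  let tabs := matrix.foldl (fun (acc : List Int × List Int) row =>
      let t := PySem.List.slice row none (some (m : Int))
      (List.zipWith (fun c x => c + x) acc.1 t, acc.2 ++ [t.sum]))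
      (List.replicate m 0, [])
  let colSel := (PySem.List.enumerate tabs.1 0).foldl
      (fun (st : Int × Int) js => if js.2 > st.2 then js else st) (0, 0)
  let rowSel := (PySem.List.enumerate (PySem.List.slice tabs.2 (some 1) none) 1).foldl
      (fun (st : Int × Int) p => if p.2 ≠ 0 ∧ p.2 < st.2 then p else st)
      (0, PySem.List.pyGetD tabs.2 0 0)
  (rowSel.1, colSel.1)

-- ===== PRECONDITION & SPEC =====
-- Pre_: exactly where A returns without exception: matrix[0] must exist (IndexError on []),
-- and every row must be indexable at each column index < len(matrix[0]) (IndexError otherwise).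
def Pre_greatest_column_to_row_sum_ratio_element (matrix : List (List Int)) : Prop :=
  matrix ≠ [] ∧ ∀ r ∈ matrix, (matrix.headD []).length ≤ r.length
instance (matrix : List (List Int)) : Decidable (Pre_greatest_column_to_row_sum_ratio_element matrix) := by unfold Pre_greatest_column_to_row_sum_ratio_element; infer_instance

def pvWitness_greatest_column_to_row_sum_ratio_element : List (List Int) := [[1, -2], [3, 4]]

def Spec_greatest_column_to_row_sum_ratio_element (matrix : List (List Int)) (out : Int × Int) : Prop := out = greatest_column_to_row_sum_ratio_element_alt matrix
instance (matrix : List (List Int)) (out : Int × Int) : Decidable (Spec_greatest_column_to_row_sum_ratio_element matrix out) := by unfold Spec_greatest_column_to_row_sum_ratio_element; infer_instance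

-- ===== CLAIM (what is proved, stated in full; the proofs are below) =====
def Claim_equal_greatest_column_to_row_sum_ratio_element : Prop := ∀ (matrix : List (List Int)), Dom_greatest_column_to_row_sum_ratio_element matrix → Pre_greatest_column_to_row_sum_ratio_element matrix → Spec_greatest_column_to_row_sum_ratio_element matrix (greatest_column_to_row_sum_ratio_element matrix)

-- ===== LEMMAS AND PROOFS =====

lemma pv_map_getD_range_eq_take (xs : List Int) (n : Nat) (h : n ≤ xs.length) :
    (List.range n).map (fun j => xs.getD j 0) = xs.take n := by
  apply List.ext_getElem
  · simp [h]
  · intro i h1 h2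
    simp at h1
    simp [List.getElem_take, List.getD_eq_getElem?_getD, List.getElem?_eq_getElem (by omega : i < xs.length)]

lemma pv_colfold (m : Nat) (rows : List (List Int)) :
    ∀ (cs : List Int), cs.length = m → (∀ r ∈ rows, m ≤ r.length) →
    rows.foldl (fun cs row => List.zipWith (fun c x => c + x) cs (PySem.List.slice row none (some (m : Int)))) cs
      = (List.range m).map (fun j => cs.getD j 0 + (rows.map (fun r => r.getD j 0)).sum) := by
  induction rows with
  | nil =>
    intro cs hlen _
    simp only [List.foldl_nil, List.map_nil, List.sum_nil, add_zero]
    apply List.ext_getElem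
    · simp [hlen]
    · intro i h1 h2
      simp at h2
      simp [List.getD_eq_getElem?_getD, List.getElem?_eq_getElem (by omega : i < cs.length)]
  | cons r rs ih =>
    intro cs hlen hrows
    have hr : m ≤ r.length := hrows r (by simp)
    rw [List.foldl_cons, PySem.List.slice_to_natCast]
    have hlen' : (List.zipWith (fun c x => c + x) cs (r.take m)).length = m := by
      simp [hlen, hr]
    rw [ih _ hlen' (fun r hm => hrows r (by simp [hm]))]
    apply List.map_congr_left
    intro j hj
    simp at hj
    have h1 : j < cs.length := by omega
    have : (List.zipWith (fun c x => c + x) cs (r.take m)).getD j 0 = cs.getD j 0 + r.getD j 0 := by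
      rw [List.getD_eq_getElem?_getD, List.getElem?_eq_getElem (by simp [hlen, hr]; omega)]
      simp [List.getElem_zipWith, List.getElem_take,
        List.getD_eq_getElem?_getD, List.getElem?_eq_getElem h1,
        List.getElem?_eq_getElem (by omega : j < r.length)]
    rw [this]
    simp [add_assoc]

lemma pv_scan_bridge (P : Int → Int → Prop) [DecidableRel P] (curr : Int → Int) :
    ∀ (ys : List Int) (s : Int) (st : Int × Int),
    (∀ k, (hk : k < ys.length) → curr (s + k) = ys[k]) →
    (PySem.List.pyRange s (s + ys.length)).foldl
        (fun st i => if P (curr i) st.2 then (i, curr i) else st) st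
      = (PySem.List.enumerate ys s).foldl
        (fun st p => if P p.2 st.2 then p else st) st := by
  intro ys
  induction ys with
  | nil => intro s st _; simp [PySem.List.enumerate]
  | cons y t ih =>
    intro s st h
    rw [PySem.List.pyRange_one_cons (by simp only [List.length_cons]; push_cast; omega),
      PySem.List.enumerate_cons]
    simp only [List.foldl_cons]
    have h0 : curr s = y := by simpa using h 0 (by simp)
    rw [h0]
    have := ih (s + 1) (if P y st.2 then (s, y) else st) (fun k hk => by
      have := h (k + 1) (by simp; omega)
      push_cast at this ⊢
      rw [show s + 1 + (k : Int) = s + (k + 1) by ring]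
      simpa using this)
    simp only [List.length_cons] at *
    rw [← this]
    have hs : s + 1 + (t.length : Int) = s + ((t.length : Int) + 1) := by ring
    rw [hs]
    norm_cast

lemma pv_main (r0 : List Int) (rest : List (List Int))
    (hrows : ∀ r ∈ (r0 :: rest), r0.length ≤ r.length) :
    greatest_column_to_row_sum_ratio_element (r0 :: rest)
      = greatest_column_to_row_sum_ratio_element_alt (r0 :: rest) := by
  have h0 : PySem.List.pyGetD (r0 :: rest) 0 ([] : List Int) = r0 := by simp [pysem]
  -- the two tables B builds
  have hcolt : (r0 :: rest).foldl (fun cs row =>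
        List.zipWith (fun c x => c + x) cs (PySem.List.slice row none (some (r0.length : Int))))
        (List.replicate r0.length 0)
      = (List.range r0.length).map (fun j => (((r0 :: rest)).map (fun r => r.getD j 0)).sum) := by
    rw [pv_colfold r0.length _ _ (by simp) hrows]
    apply List.map_congr_left
    intro j hj
    simp
  have hrowt : (r0 :: rest).foldl (fun rs row =>
        rs ++ [(PySem.List.slice row none (some (r0.length : Int))).sum]) ([] : List Int)
      = r0.sum :: rest.map (fun r => (r.take r0.length).sum) := by
    rw [PySem.List.foldl_append_singleton_eq_map
      (f := fun row => (PySem.List.slice row none (some (r0.length : Int))).sum)]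
    simp [PySem.List.slice_to_natCast]
  -- A's per-column sums are B's col_sums entries
  have hcolhyp : ∀ k, (hk : k < ((List.range r0.length).map
        (fun j => (((r0 :: rest)).map (fun r => r.getD j 0)).sum)).length) →
      (PySem.List.pyRange 0 (((r0 :: rest).length : Nat) : Int)).foldl
          (fun c rowIdx => c + PySem.List.pyGetD (PySem.List.pyGetD (r0 :: rest) rowIdx []) ((0:Int) + k) 0) 0
        = ((List.range r0.length).map (fun j => (((r0 :: rest)).map (fun r => r.getD j 0)).sum))[k] := by
    intro k hk
    simp only [List.length_map, List.length_range] at hk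
    rw [PySem.List.foldl_add]
    rw [show ((((r0 :: rest)).length : Nat) : Int) = PySem.List.len (r0 :: rest) from rfl]
    rw [show (fun rowIdx => PySem.List.pyGetD (PySem.List.pyGetD (r0 :: rest) rowIdx []) ((0:Int) + k) 0)
        = (fun r => PySem.List.pyGetD r ((0:Int) + k) 0) ∘ (fun rowIdx => PySem.List.pyGetD (r0 :: rest) rowIdx []) from rfl,
      ← List.map_map, PySem.List.map_pyGetD_pyRange_zero]
    simp [PySem.List.pyGetD_natCast, hk]
  -- A's per-row sums are B's row_sums entries
  have hrowhyp : ∀ k, (hk : k < (rest.map (fun r => (r.take r0.length).sum)).length) →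
      (PySem.List.pyRange 0 ((r0.length : Nat) : Int)).foldl
          (fun c colIdx => c + PySem.List.pyGetD (PySem.List.pyGetD (r0 :: rest) ((1:Int) + k) []) colIdx 0) 0
        = (rest.map (fun r => (r.take r0.length).sum))[k] := by
    intro k hk
    simp only [List.length_map] at hk
    have hidx : PySem.List.pyGetD (r0 :: rest) ((1:Int) + k) [] = rest[k] := by
      rw [show ((1:Int) + k) = ((k + 1 : Nat) : Int) by push_cast; ring, PySem.List.pyGetD_natCast]
      simp [List.getD_eq_getElem?_getD, List.getElem?_eq_getElem (by simpa using hk)]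
    rw [PySem.List.foldl_add]
    simp only [hidx]
    rw [PySem.List.pyRange_zero_natCast, List.map_map]
    have : ((fun colIdx => PySem.List.pyGetD rest[k] colIdx 0) ∘ fun k => ((k : Nat) : Int))
        = fun j => rest[k].getD j 0 := by
      funext j
      simp [PySem.List.pyGetD_natCast]
    rw [this, pv_map_getD_range_eq_take _ _ (hrows rest[k] (by simp [List.getElem_mem]))]
    simp
  -- assemble
  simp only [greatest_column_to_row_sum_ratio_element, greatest_column_to_row_sum_ratio_element_alt, h0]
  rw [PySem.List.foldl_prod_mk
    (f := fun cs row => List.zipWith (fun c x => c + x) cs (PySem.List.slice row none (some ((r0.length : Nat) : Int))))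
    (g := fun rs row => rs ++ [(PySem.List.slice row none (some ((r0.length : Nat) : Int))).sum])]
  simp only [hcolt, hrowt]
  have hcolbridge := pv_scan_bridge (P := fun a b => a > b)
    (curr := fun colIdx => (PySem.List.pyRange 0 ((((r0 :: rest)).length : Nat) : Int)).foldl
      (fun c rowIdx => c + PySem.List.pyGetD (PySem.List.pyGetD (r0 :: rest) rowIdx []) colIdx 0) 0)
    ((List.range r0.length).map (fun j => (((r0 :: rest)).map (fun r => r.getD j 0)).sum)) 0 (0, 0) hcolhyp
  simp only [List.length_map, List.length_range, zero_add] at hcolbridge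
  rw [hcolbridge]
  have hrowbridge := pv_scan_bridge (P := fun a b => a ≠ 0 ∧ a < b)
    (curr := fun rowIdx => (PySem.List.pyRange 0 ((r0.length : Nat) : Int)).foldl
      (fun c colIdx => c + PySem.List.pyGetD (PySem.List.pyGetD (r0 :: rest) rowIdx []) colIdx 0) 0)
    (rest.map (fun r => (r.take r0.length).sum)) 1 (0, r0.sum) hrowhyp
  rw [show (1:Int) + ((rest.map (fun r => (r.take r0.length).sum)).length : Int)
      = (((r0 :: rest).length : Nat) : Int) by simp; ring] at hrowbridge
  rw [hrowbridge]
  simp [pysem, PySem.List.slice_from_one]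


-- ===== VERDICT (by name: the statement is the Claim_ definition above) =====
theorem greatest_column_to_row_sum_ratio_element_spec : Claim_equal_greatest_column_to_row_sum_ratio_element := by
  intro matrix _ hpre
  obtain ⟨hne, hrows⟩ := hpre
  cases matrix with
  | nil => exact absurd rfl hne
  | cons r0 rest =>
    unfold Spec_greatest_column_to_row_sum_ratio_element
    exact pv_main r0 rest (by simpa using hrows)
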